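-- pv_equiv track=rewrite | github.com/Lightblues/Leetcode | interview-list/231108-huawei/3.py | max_limit_count
-- ===== SOURCE A (Python) =====
-- def max_limit_count(arr, mx):
--     if mx==0:
--         return arr.count(0)
--     # reverse sort?
--     arr.sort(reverse=True)
--     dp = [-1] * (mx+1)
--     dp[0] = 0
--     for x in arr:
--         for i in range(mx, x-1, -1):
--             dp[i] = max(dp[i], dp[i-x]+1)
--     for i in range(len(dp)-1,-1,-1):
--         if dp[i] != -1:
--             return dp[i]
-- ===== SOURCE B (Python) =====
-- def max_limit_count(arr, mx):
--     if mx == 0: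
--         return arr.count(0)
--     arr.sort(reverse=True)  # keep A's in-place sort side effect
--     memo = {}
--
--     def best(i, t):
--         # value of A's dp cell semantics: max over subsets S of arr[i:]
--         # with sum(S) <= t of (|S| if sum(S) == t else |S| - 1)
--         if i == len(arr):
--             return 0 if t == 0 else -1
--         key = (i, t)
--         if key in memo:
--             return memo[key]
--         r = best(i + 1, t)
--         if arr[i] <= t:
--             r = max(r, best(i + 1, t - arr[i]) + 1)
--         memo[key] = r
--         return r
--
--     for t in range(mx, -1, -1):
--         v = best(0, t)
--         if v != -1:
--             return v
-- ===== Notes on version B (the rewrite author's own statement) =====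
-- stated objective: alternative
-- what changed: Replaced A's bottom-up in-place 1D rolling dp array (with its reverse inner index loop and final scan over dp cells) by a top-down memoized recursion best(i, t) over the item list with the same recurrence, followed by a scan of targets mx..0 returning the first reachable value; Pre_ excludes inputs where A raises (mx < 0, or mx > 0 with a negative element, which indexes dp out of range).
import Mathlib
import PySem

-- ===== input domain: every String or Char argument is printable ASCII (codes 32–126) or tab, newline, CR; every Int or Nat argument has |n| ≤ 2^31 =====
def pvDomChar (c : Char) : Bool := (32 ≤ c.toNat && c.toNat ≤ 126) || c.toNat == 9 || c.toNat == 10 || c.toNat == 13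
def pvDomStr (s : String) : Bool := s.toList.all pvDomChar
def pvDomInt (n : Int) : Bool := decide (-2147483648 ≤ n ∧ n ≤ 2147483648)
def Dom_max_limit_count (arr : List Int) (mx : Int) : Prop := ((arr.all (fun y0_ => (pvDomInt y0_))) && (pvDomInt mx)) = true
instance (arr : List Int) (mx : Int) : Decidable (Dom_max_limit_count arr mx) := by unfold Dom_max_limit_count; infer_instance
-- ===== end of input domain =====

-- B replaces A's bottom-up in-place 1D dp array by a top-down recursion over the item
-- list plus a scan of targets (same recurrence, different decomposition); equivalence is
-- about the RETURN value (both Pythons also sort arr in place, the same mutation).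

-- ===== PORT A =====
-- inner loop 'for i in range(mx, x-1, -1): dp[i] = max(dp[i], dp[i-x]+1)'
-- (indices are in range for every executed iteration under Pre_, so pyGetD/pySetD are exact there)
def pvInner (mx x : Int) (d : List Int) : List Int :=
  (PySem.List.pyRange mx (x-1) (-1)).foldl
    (fun d i =>
      PySem.List.pySetD d i (max (PySem.List.pyGetD d i 0) (PySem.List.pyGetD d (i - x) 0 + 1))) d

def max_limit_count (arr : List Int) (mx : Int) : Int :=
  if mx == 0 then (PySem.List.count arr 0 : Int)
  else
    let arr' := PySem.List.sorted arr (fun x => x) true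
    let dp0 := PySem.List.pySetD (List.replicate (mx + 1).toNat (-1 : Int)) 0 0
    let dp := arr'.foldl (fun d x => pvInner mx x d) dp0
    match (PySem.List.pyRange ((dp.length : Int) - 1) (-1) (-1)).findSome?
        (fun i => if PySem.List.pyGetD dp i 0 ≠ -1 then some (PySem.List.pyGetD dp i 0) else none) with
    | some v => v
    | none => 0  -- Python returns None here; unreachable under Pre_ (dp[0] = 0)

-- ===== PORT B =====
-- Source B's memoized best(i, t) over arr[i:], ported as the same recursion on the remaining
-- list (the memo cache only avoids recomputation; every computed value is identical)
def pvBest : List Int → Int → Int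
  | [], t => if t == 0 then 0 else -1
  | x :: rest, t =>
      let r := pvBest rest t
      if x ≤ t then max r (pvBest rest (t - x) + 1) else r

def max_limit_count_alt (arr : List Int) (mx : Int) : Int :=
  if mx == 0 then (PySem.List.count arr 0 : Int)
  else
    let arr' := PySem.List.sorted arr (fun x => x) true
    match (PySem.List.pyRange mx (-1) (-1)).findSome?
        (fun t => let v := pvBest arr' t; if v ≠ -1 then some v else none) with
    | some v => v
    | none => 0  -- Python returns None here; unreachable under Pre_

-- ===== PRECONDITION & SPEC =====
-- Pre_ excludes exactly the inputs where A raises IndexError: mx < 0 (dp is empty at dp[0] = 0),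
-- and mx > 0 with a negative element (dp[i-x] indexes beyond the end of dp).
def Pre_max_limit_count (arr : List Int) (mx : Int) : Prop :=
  mx = 0 ∨ (0 < mx ∧ ∀ x ∈ arr, 0 ≤ x)
instance (arr : List Int) (mx : Int) : Decidable (Pre_max_limit_count arr mx) := by
  unfold Pre_max_limit_count; infer_instance

def pvWitness_max_limit_count : List Int × Int := ([2, 1], 3)

def Spec_max_limit_count (arr : List Int) (mx : Int) (out : Int) : Prop := out = max_limit_count_alt arr mx
instance (arr : List Int) (mx : Int) (out : Int) : Decidable (Spec_max_limit_count arr mx out) := by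
  unfold Spec_max_limit_count; infer_instance

-- ===== CLAIM (what is proved, stated in full; the proofs are below) =====
def Claim_equal_max_limit_count : Prop := ∀ (arr : List Int) (mx : Int), Dom_max_limit_count arr mx → Pre_max_limit_count arr mx → Spec_max_limit_count arr mx (max_limit_count arr mx)

-- ===== LEMMAS AND PROOFS =====

-- dp-cell semantics of processing a list of items against an arbitrary base row b
def pvGb : List Int → (Int → Int) → Int → Int
  | [], b, t => b t
  | x :: r, b, t => if x ≤ t then max (pvGb r b t) (pvGb r b (t - x) + 1) else pvGb r b t

theorem pvBest_eq_Gb (l : List Int) (t : Int) :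
    pvBest l t = pvGb l (fun j => if j == 0 then 0 else -1) t := by
  induction l generalizing t with
  | nil => rfl
  | cons x r ih => simp [pvBest, pvGb, ih]

theorem pvGb_congr (r : List Int) (hr : ∀ y ∈ r, 0 ≤ y) (b1 b2 : Int → Int) (t : Int)
    (hb : ∀ j, 0 ≤ j → j ≤ t → b1 j = b2 j) (ht : 0 ≤ t) :
    pvGb r b1 t = pvGb r b2 t := by
  induction r generalizing t with
  | nil => exact hb t ht le_rfl
  | cons y r ih =>
      have hy : 0 ≤ y := hr y (by simp)
      have hr' : ∀ z ∈ r, 0 ≤ z := fun z hz => hr z (by simp [hz])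
      by_cases h : y ≤ t
      · simp only [pvGb, if_pos h]
        rw [ih hr' t hb ht, ih hr' (t - y) (fun j h0 hj => hb j h0 (by omega)) (by omega)]
      · simp only [pvGb, if_neg h]
        exact ih hr' t hb ht

theorem pvGb_commute (r : List Int) (hr : ∀ y ∈ r, 0 ≤ y) (x : Int) (hx : 0 ≤ x)
    (b : Int → Int) (t : Int) (ht : 0 ≤ t) :
    pvGb r (fun j => if x ≤ j then max (b j) (b (j - x) + 1) else b j) t = pvGb (x :: r) b t := by
  induction r generalizing b t with
  | nil => simp [pvGb]
  | cons y r ih =>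
      have hy : 0 ≤ y := hr y (by simp)
      have hr' : ∀ z ∈ r, 0 ≤ z := fun z hz => hr z (by simp [hz])
      show pvGb (y :: r) _ t = pvGb (x :: y :: r) b t
      by_cases hyt : y ≤ t
      · rw [show pvGb (y :: r) (fun j => if x ≤ j then max (b j) (b (j - x) + 1) else b j) t
            = max (pvGb r (fun j => if x ≤ j then max (b j) (b (j - x) + 1) else b j) t)
                  (pvGb r (fun j => if x ≤ j then max (b j) (b (j - x) + 1) else b j) (t - y) + 1)
            from by simp [pvGb, hyt]]
        rw [ih hr' b t ht, ih hr' b (t - y) (by omega)]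
        by_cases hxt : x ≤ t
        · by_cases hxy : x ≤ t - y
          · simp only [pvGb, if_pos hxt, if_pos hxy, if_pos hyt, if_pos (show y ≤ t - x by omega)]
            rw [show t - y - x = t - x - y by ring]
            omega
          · simp only [pvGb, if_pos hxt, if_neg hxy, if_pos hyt, if_neg (show ¬ y ≤ t - x by omega)]
            rw [max_right_comm]
        · simp only [pvGb, if_neg hxt, if_neg (show ¬ x ≤ t - y by omega), if_pos hyt]
      · rw [show pvGb (y :: r) (fun j => if x ≤ j then max (b j) (b (j - x) + 1) else b j) t
            = pvGb r (fun j => if x ≤ j then max (b j) (b (j - x) + 1) else b j) t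
            from by simp [pvGb, hyt]]
        rw [ih hr' b t ht]
        by_cases hxt : x ≤ t
        · simp only [pvGb, if_pos hxt, if_neg hyt, if_neg (show ¬ y ≤ t - x by omega)]
        · simp only [pvGb, if_neg hxt, if_neg hyt]

-- the inner downward loop, started at an arbitrary upper index a
def pvInnerFrom (a x : Int) (d : List Int) : List Int :=
  (PySem.List.pyRange a (x - 1) (-1)).foldl
    (fun d i =>
      PySem.List.pySetD d i (max (PySem.List.pyGetD d i 0) (PySem.List.pyGetD d (i - x) 0 + 1))) d

theorem pvInner_eq_from (mx x : Int) (d : List Int) : pvInner mx x d = pvInnerFrom mx x d := rfl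

theorem pv_fold_set_length (l : List Int) (x : Int) (d : List Int) :
    (l.foldl (fun d i =>
      PySem.List.pySetD d i (max (PySem.List.pyGetD d i 0) (PySem.List.pyGetD d (i - x) 0 + 1))) d).length
      = d.length := by
  induction l generalizing d with
  | nil => rfl
  | cons i l ih => rw [List.foldl_cons, ih, PySem.List.length_pySetD]

theorem pvInnerFrom_length (a x : Int) (d : List Int) : (pvInnerFrom a x d).length = d.length :=
  pv_fold_set_length _ x d

theorem pv_getD_setD (d : List Int) (i : Int) (hi0 : 0 ≤ i)
    (v m : Int) (hm0 : 0 ≤ m) (hm : m < (d.length : Int)) :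
    PySem.List.pyGetD (PySem.List.pySetD d i v) m 0 = if m = i then v else PySem.List.pyGetD d m 0 := by
  rw [PySem.List.pySetD_of_nonneg d v hi0]
  rw [PySem.List.pyGetD_eq_getElem _ 0 hm0 (by simpa using hm),
      PySem.List.pyGetD_eq_getElem _ 0 hm0 hm]
  rw [List.getElem_set]
  by_cases h : m = i
  · rw [if_pos (by omega), if_pos h]
  · rw [if_neg (by omega), if_neg h]

theorem pvInnerFrom_get_aux (n : Nat) (x : Int) (hx : 0 ≤ x) :
    ∀ (a : Int) (d : List Int), a < (d.length : Int) → (a - (x - 1)).toNat = n →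
    ∀ (j : Int), 0 ≤ j → j < (d.length : Int) →
    PySem.List.pyGetD (pvInnerFrom a x d) j 0 =
      (if x ≤ j ∧ j ≤ a then max (PySem.List.pyGetD d j 0) (PySem.List.pyGetD d (j - x) 0 + 1)
       else PySem.List.pyGetD d j 0) := by
  induction n with
  | zero =>
      intro a d ha hn j hj0 hj
      unfold pvInnerFrom
      rw [PySem.List.pyRange_neg_one_eq_nil (by omega), List.foldl_nil, if_neg (by omega)]
  | succ n ih =>
      intro a d ha hn j hj0 hj
      have hxa : x - 1 < a := by omega
      have ha0 : 0 ≤ a := by omega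
      unfold pvInnerFrom
      rw [PySem.List.pyRange_neg_one_cons hxa, List.foldl_cons]
      set v := max (PySem.List.pyGetD d a 0) (PySem.List.pyGetD d (a - x) 0 + 1) with hv
      set d' := PySem.List.pySetD d a v with hd'
      have hlen : d'.length = d.length := PySem.List.length_pySetD d a v
      have hrest : ((PySem.List.pyRange (a - 1) (x - 1) (-1)).foldl
          (fun d i => PySem.List.pySetD d i
            (max (PySem.List.pyGetD d i 0) (PySem.List.pyGetD d (i - x) 0 + 1))) d')
          = pvInnerFrom (a - 1) x d' := rfl
      rw [hrest, ih (a - 1) d' (by omega) (by omega) j hj0 (by omega)]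
      have hget : ∀ m : Int, 0 ≤ m → m ≠ a → m < (d.length : Int) →
          PySem.List.pyGetD d' m 0 = PySem.List.pyGetD d m 0 := by
        intro m hm0 hma hmlen
        rw [hd', pv_getD_setD d a ha0 v m hm0 hmlen, if_neg hma]
      by_cases h1 : x ≤ j ∧ j ≤ a - 1
      · rw [if_pos h1, if_pos (show x ≤ j ∧ j ≤ a by omega)]
        rw [hget j hj0 (by omega) (by omega), hget (j - x) (by omega) (by omega) (by omega)]
      · by_cases h2 : j = a
        · rw [if_neg (by omega), if_pos (show x ≤ j ∧ j ≤ a by omega)]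
          rw [hd', pv_getD_setD d a ha0 v j hj0 hj, if_pos h2, hv, h2]
        · rw [if_neg (by omega), if_neg (show ¬ (x ≤ j ∧ j ≤ a) by omega)]
          exact hget j hj0 h2 (by omega)

theorem pvInnerFrom_get (a x : Int) (hx : 0 ≤ x) (d : List Int) (ha : a < (d.length : Int))
    (j : Int) (hj0 : 0 ≤ j) (hj : j < (d.length : Int)) :
    PySem.List.pyGetD (pvInnerFrom a x d) j 0 =
      if x ≤ j ∧ j ≤ a then max (PySem.List.pyGetD d j 0) (PySem.List.pyGetD d (j - x) 0 + 1)
      else PySem.List.pyGetD d j 0 :=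
  pvInnerFrom_get_aux (a - (x - 1)).toNat x hx a d ha rfl j hj0 hj

theorem pvFold_length (l : List Int) (mx : Int) (d : List Int) :
    (l.foldl (fun d x => pvInner mx x d) d).length = d.length := by
  induction l generalizing d with
  | nil => rfl
  | cons x r ih =>
      rw [List.foldl_cons, ih, pvInner_eq_from, pvInnerFrom_length]

theorem pvFold_get (l : List Int) (hl : ∀ y ∈ l, 0 ≤ y) (mx : Int) (d : List Int)
    (hd : (d.length : Int) = mx + 1) (t : Int) (ht0 : 0 ≤ t) (ht : t ≤ mx) :
    PySem.List.pyGetD (l.foldl (fun d x => pvInner mx x d) d) t 0 =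
      pvGb l (fun j => PySem.List.pyGetD d j 0) t := by
  induction l generalizing d with
  | nil => rfl
  | cons x r ih =>
      have hx : 0 ≤ x := hl x (by simp)
      have hr : ∀ y ∈ r, 0 ≤ y := fun y hy => hl y (by simp [hy])
      rw [List.foldl_cons,
          ih hr (pvInner mx x d) (by rw [pvInner_eq_from, pvInnerFrom_length]; exact hd)]
      rw [pvGb_congr r hr _
            (fun j => if x ≤ j then max (PySem.List.pyGetD d j 0) (PySem.List.pyGetD d (j - x) 0 + 1)
                      else PySem.List.pyGetD d j 0) t ?_ ht0]
      · exact pvGb_commute r hr x hx _ t ht0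
      · intro j hj0 hjt
        rw [pvInner_eq_from, pvInnerFrom_get mx x hx d (by omega) j hj0 (by omega)]
        simp only []
        by_cases hxj : x ≤ j
        · rw [if_pos ⟨hxj, by omega⟩, if_pos hxj]
        · rw [if_neg (by omega), if_neg hxj]

theorem pv_findSome_congr {α β : Type} (f g : α → Option β) (l : List α)
    (h : ∀ a ∈ l, f a = g a) : l.findSome? f = l.findSome? g := by
  induction l with
  | nil => rfl
  | cons a l ih =>
      simp only [List.findSome?_cons, h a (by simp)]
      cases g a with
      | none => exact ih fun a ha => h a (by simp [ha])
      | some b => rfl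

-- ===== VERDICT (by name: the statement is the Claim_ definition above) =====
theorem max_limit_count_spec : Claim_equal_max_limit_count := by
  intro arr mx _hdom hpre
  unfold Spec_max_limit_count
  by_cases hmx : mx = 0
  · simp [max_limit_count, max_limit_count_alt, hmx]
  · have hpos : 0 < mx := by
      rcases hpre with h | ⟨h, _⟩
      · exact absurd h hmx
      · exact h
    have hnn : ∀ x ∈ arr, 0 ≤ x := by
      rcases hpre with h | ⟨_, h⟩
      · exact absurd h hmx
      · exact h
    rw [max_limit_count, max_limit_count_alt, if_neg (by simpa using hmx),
        if_neg (by simpa using hmx)]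
    dsimp only
    set arr' := PySem.List.sorted arr (fun x => x) true with harr'
    have hnn' : ∀ x ∈ arr', 0 ≤ x := by
      intro x hx
      exact hnn x ((PySem.List.mem_sorted arr (fun x => x) true x).mp hx)
    set dp0 := PySem.List.pySetD (List.replicate (mx + 1).toNat (-1 : Int)) 0 0 with hdp0
    have hdp0len : (dp0.length : Int) = mx + 1 := by
      rw [hdp0, PySem.List.length_pySetD, List.length_replicate]
      omega
    set dp := arr'.foldl (fun d x => pvInner mx x d) dp0 with hdp
    have hdplen : (dp.length : Int) = mx + 1 := by
      rw [hdp, pvFold_length]; exact hdp0len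
    have hcell : ∀ t : Int, 0 ≤ t → t ≤ mx → PySem.List.pyGetD dp t 0 = pvBest arr' t := by
      intro t ht0 ht
      rw [hdp, pvFold_get arr' hnn' mx dp0 hdp0len t ht0 ht, pvBest_eq_Gb]
      refine pvGb_congr arr' hnn' _ _ t ?_ ht0
      intro j hj0 hjt
      rw [hdp0, pv_getD_setD (List.replicate (mx + 1).toNat (-1 : Int)) 0 le_rfl 0 j hj0
            (by rw [List.length_replicate]; omega)]
      by_cases hj : j = 0
      · rw [if_pos hj, hj]; rfl
      · rw [if_neg hj,
            PySem.List.pyGetD_eq_getElem _ 0 hj0 (by rw [List.length_replicate]; omega),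
            List.getElem_replicate]
        simp [hj]
    have hrange : ((dp.length : Int) - 1) = mx := by omega
    rw [hrange]
    rw [pv_findSome_congr _ (fun t => let v := pvBest arr' t; if v ≠ -1 then some v else none)
          (PySem.List.pyRange mx (-1) (-1)) ?_]
    intro i hi
    have hmem := (PySem.List.mem_pyRange_neg_one).mp hi
    simp only [hcell i (by omega) (by omega)]
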